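-- pv_equiv track=rewrite | github.com/awawa-agi/agent-factory | src/agentfactory/visualizer/token_visualizer.py | _identify_collapse_groups
-- ===== SOURCE A (Python) =====
-- from typing import List, Optional, Dict, Any, Tuple
--
-- def _identify_collapse_groups(assistant_masks: List[int], min_length: int = 3) -> List[Optional[int]]:
--     """Identify consecutive groups of non-assistant tokens that should be collapsed"""
--     collapse_groups = [None] * len(assistant_masks)
--     group_id = 0
--     i = 0
--
--     while i < len(assistant_masks):
--         if assistant_masks[i] == 0:
--             start = i
--             while i < len(assistant_masks) and assistant_masks[i] == 0:
--                 i += 1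
--
--             if i - start >= min_length:
--                 for j in range(start, i):
--                     collapse_groups[j] = group_id
--                 group_id += 1
--         else:
--             i += 1
--
--     return collapse_groups
-- ===== SOURCE B (Python) =====
-- from typing import List, Optional
--
-- def _identify_collapse_groups(assistant_masks: List[int], min_length: int = 3) -> List[Optional[int]]:
--     """Identify consecutive groups of non-assistant tokens that should be collapsed.
--
--     Closed-form per-index characterization: token i belongs to a collapse group
--     iff it is a zero and the maximal zero run containing it (left extent + right
--     extent - 1) is long enough; its group id is the number of qualifying runs
--     that ended strictly before it.
--     """
--     n = len(assistant_masks)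
--     # zlen[i]: number of consecutive zeros starting at i (suffix DP; zlen[n] = 0)
--     zlen = [0] * (n + 1)
--     for i in range(n - 1, -1, -1):
--         zlen[i] = zlen[i + 1] + 1 if assistant_masks[i] == 0 else 0
--     # llen[i]: number of consecutive zeros ending at i (prefix DP)
--     llen = []
--     prev = 0
--     for m in assistant_masks:
--         prev = prev + 1 if m == 0 else 0
--         llen.append(prev)
--     # i is labeled iff its whole run (llen[i] + zlen[i] - 1 tokens) qualifies
--     labeled = [m == 0 and l + z - 1 >= min_length
--                for m, (l, z) in zip(assistant_masks, zip(llen, zlen))]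
--     # a qualifying run contributes 1 exactly at its last token (zlen == 1)
--     ends = [1 if b and z == 1 else 0 for b, z in zip(labeled, zlen)]
--     gids = [0]
--     for e in ends:
--         gids.append(gids[-1] + e)
--     return [g if b else None for b, g in zip(labeled, gids)]
-- ===== Notes on version B (the rewrite author's own statement) =====
-- stated objective: alternative
-- what changed: Replaces A's index-scanning run detection (nested while loops that find each zero run and back-fill it) by a closed-form per-index characterization: two DP arrays give each token's left/right zero-run extents, a per-index arithmetic test decides membership, and a prefix count of qualifying run ends yields the group id.
import Mathlib
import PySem

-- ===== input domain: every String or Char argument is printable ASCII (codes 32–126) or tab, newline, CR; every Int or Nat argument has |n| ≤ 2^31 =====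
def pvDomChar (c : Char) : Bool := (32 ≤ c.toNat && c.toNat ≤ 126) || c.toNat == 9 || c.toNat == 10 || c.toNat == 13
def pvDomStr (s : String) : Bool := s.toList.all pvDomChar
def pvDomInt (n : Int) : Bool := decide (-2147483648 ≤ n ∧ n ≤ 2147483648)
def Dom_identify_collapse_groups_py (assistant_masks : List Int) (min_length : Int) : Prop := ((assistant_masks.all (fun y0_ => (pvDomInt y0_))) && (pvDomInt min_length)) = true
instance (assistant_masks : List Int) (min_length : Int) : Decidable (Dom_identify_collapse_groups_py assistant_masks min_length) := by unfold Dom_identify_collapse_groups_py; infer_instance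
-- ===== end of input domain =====

-- B replaces A's index-scanning run detection by a closed-form per-index test built
-- from two DP arrays (left/right zero-run extents) plus a prefix count of run ends
-- (objective: alternative algorithm, same O(n) cost).

-- ===== PORT A =====
theorem pvA_dec_one (len i : Nat) (h : i < len) : len - (i + 1) < len - i := by omega

-- inner `while i < len and masks[i] == 0: i += 1`: returns the final i
def pvA_scan (masks : List Int) (i : Nat) : Nat :=
  if _h : i < masks.length then
    if masks[i] = 0 then pvA_scan masks (i + 1) else i
  else i
termination_by masks.length - i
decreasing_by exact pvA_dec_one masks.length i _h

theorem pvA_scan_ge (masks : List Int) (i : Nat) : i ≤ pvA_scan masks i := by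
  unfold pvA_scan
  split
  · split
    · exact le_trans (Nat.le_succ i) (pvA_scan_ge masks (i + 1))
    · exact le_refl i
  · exact le_refl i
termination_by masks.length - i

theorem pvA_scan_le (masks : List Int) (i : Nat) (h : i ≤ masks.length) :
    pvA_scan masks i ≤ masks.length := by
  unfold pvA_scan
  split
  · split
    · exact pvA_scan_le masks (i + 1) (by omega)
    · exact h
  · exact h
termination_by masks.length - i

theorem pvA_scan_gt (masks : List Int) (i : Nat) (h : i < masks.length) (hz : masks[i] = 0) :
    i < pvA_scan masks i := by
  have := pvA_scan_ge masks (i + 1)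
  unfold pvA_scan
  rw [dif_pos h, if_pos hz]
  omega

theorem pvA_dec_scan (masks : List Int) (i : Nat) (h : i < masks.length) (hz : masks[i] = 0) :
    masks.length - pvA_scan masks i < masks.length - i := by
  have h1 := pvA_scan_gt masks i h hz
  have h2 := pvA_scan_le masks i (le_of_lt h)
  omega

-- `for j in range(start, i): collapse_groups[j] = group_id`
def pvA_fill (cg : List (Option Int)) (start stop : Nat) (gid : Int) : List (Option Int) :=
  (List.range' start (stop - start)).foldl (fun acc j => acc.set j (some gid)) cg

-- outer `while i < len(assistant_masks)` loop
def pvA_loop (masks : List Int) (ml : Int) (cg : List (Option Int)) (gid : Int) (i : Nat) :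
    List (Option Int) :=
  if h : i < masks.length then
    if hz : masks[i] = 0 then
      -- start = i; inner while advances i to pvA_scan masks i
      if ((pvA_scan masks i : Int) - (i : Int)) ≥ ml then
        pvA_loop masks ml (pvA_fill cg i (pvA_scan masks i) gid) (gid + 1) (pvA_scan masks i)
      else pvA_loop masks ml cg gid (pvA_scan masks i)
    else pvA_loop masks ml cg gid (i + 1)
  else cg
termination_by masks.length - i
decreasing_by
  · exact pvA_dec_scan masks i h hz
  · exact pvA_dec_scan masks i h hz
  · exact pvA_dec_one masks.length i h

def identify_collapse_groups_py (assistant_masks : List Int) (min_length : Int) :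
    List (Option Int) :=
  pvA_loop assistant_masks min_length (List.replicate assistant_masks.length none) 0 0

-- ===== PORT B =====
-- `for i in range(n-1, -1, -1): zlen[i] = zlen[i+1]+1 if m[i]==0 else 0` (suffix DP, n+1 entries)
def pvB_zlen : List Int → List Nat
  | [] => [0]
  | x :: xs => (if x = 0 then (pvB_zlen xs).headD 0 + 1 else 0) :: pvB_zlen xs

-- `prev = prev+1 if m==0 else 0; llen.append(prev)` (prefix DP)
def pvB_llenAux (prev : Nat) : List Int → List Nat
  | [] => []
  | x :: xs =>
    (if x = 0 then prev + 1 else 0) :: pvB_llenAux (if x = 0 then prev + 1 else 0) xs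

-- `gids = [0]; for e in ends: gids.append(gids[-1] + e)` (running prefix sums)
def pvB_accum (a : Int) : List Int → List Int
  | [] => []
  | e :: t => (a + e) :: pvB_accum (a + e) t

def identify_collapse_groups_py_alt (assistant_masks : List Int) (min_length : Int) :
    List (Option Int) :=
  let zlen := pvB_zlen assistant_masks
  let llen := pvB_llenAux 0 assistant_masks
  -- `labeled = [m == 0 and l + z - 1 >= min_length for m, (l, z) in zip(masks, zip(llen, zlen))]`
  let labeled := List.zipWith
    (fun m lz => decide (m = 0 ∧ (lz.1 : Int) + (lz.2 : Int) - 1 ≥ min_length))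
    assistant_masks (llen.zip zlen)
  -- `ends = [1 if b and z == 1 else 0 for b, z in zip(labeled, zlen)]`
  let ends := List.zipWith (fun b z => if b && (z == 1) then (1 : Int) else 0) labeled zlen
  -- `gids = [0]` ++ running sums
  let gids := 0 :: pvB_accum 0 ends
  -- `[g if b else None for b, g in zip(labeled, gids)]`
  List.zipWith (fun b g => if b then some g else none) labeled gids

-- ===== PRECONDITION & SPEC =====
def Spec_identify_collapse_groups_py (assistant_masks : List Int) (min_length : Int) (out : List (Option Int)) : Prop := out = identify_collapse_groups_py_alt assistant_masks min_length
instance (assistant_masks : List Int) (min_length : Int) (out : List (Option Int)) : Decidable (Spec_identify_collapse_groups_py assistant_masks min_length out) := by unfold Spec_identify_collapse_groups_py; infer_instance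

-- ===== CLAIM (what is proved, stated in full; the proofs are below) =====
def Claim_equal_identify_collapse_groups_py : Prop := ∀ (assistant_masks : List Int) (min_length : Int), Dom_identify_collapse_groups_py assistant_masks min_length → Spec_identify_collapse_groups_py assistant_masks min_length (identify_collapse_groups_py assistant_masks min_length)

-- ===== LEMMAS AND PROOFS =====

/- Proof intermediate: run-length encoding of the mask list, and a per-run emitter.
   A is shown equal to `emit ∘ rle` (run decomposition of its while loops), and B is
   shown equal to it as well (its DP arrays are computed run by run). -/
def pvB_rle : List Int → List (Int × Nat)
  | [] => []
  | x :: xs =>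
    match pvB_rle xs with
    | [] => [(x, 1)]
    | (v, n) :: rest => if x = v then (v, n + 1) :: rest else (x, 1) :: (v, n) :: rest

def pvB_emit (ml : Int) (gid : Int) : List (Int × Nat) → List (Option Int)
  | [] => []
  | (v, n) :: rest =>
    if v = 0 ∧ (n : Int) ≥ ml then
      List.replicate n (some gid) ++ pvB_emit ml (gid + 1) rest
    else
      List.replicate n none ++ pvB_emit ml gid rest

theorem pvA_scan_drop (masks : List Int) (i : Nat) (_ : i ≤ masks.length) :
    masks.drop i = List.replicate (pvA_scan masks i - i) 0 ++ masks.drop (pvA_scan masks i) := by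
  unfold pvA_scan
  split
  · rename_i hlt
    split
    · rename_i hz
      have ih := pvA_scan_drop masks (i + 1) (by omega)
      have hge := pvA_scan_ge masks (i + 1)
      rw [List.drop_eq_getElem_cons hlt, hz, ih]
      have he : pvA_scan masks (i + 1) - i = (pvA_scan masks (i + 1) - (i + 1)) + 1 := by omega
      rw [he, List.replicate_succ]
      simp
    · simp
  · simp
termination_by masks.length - i

theorem pvA_scan_stop (masks : List Int) (i : Nat) :
    ∀ x t, masks.drop (pvA_scan masks i) = x :: t → x ≠ 0 := by
  unfold pvA_scan
  split
  · rename_i hlt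
    split
    · exact pvA_scan_stop masks (i + 1)
    · rename_i hz
      intro x t hx
      rw [List.drop_eq_getElem_cons hlt] at hx
      cases hx
      exact hz
  · rename_i hge
    intro x t hx
    rw [List.drop_eq_nil_of_le (by omega)] at hx
    cases hx
termination_by masks.length - i

theorem pvA_fill_loop (gid : Int) : ∀ (n i : Nat) (cg : List (Option Int)), i + n ≤ cg.length →
    (List.range' i n).foldl (fun acc j => acc.set j (some gid)) cg
      = cg.take i ++ List.replicate n (some gid) ++ cg.drop (i + n) := by
  intro n
  induction n with
  | zero => intro i cg _; simp
  | succ n ih =>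
    intro i cg h
    rw [List.range'_succ]
    simp only [List.foldl_cons]
    rw [ih (i + 1) (cg.set i (some gid)) (by simpa using by omega)]
    have hi : i < cg.length := by omega
    rw [List.set_eq_take_append_cons_drop, if_pos hi]
    rw [List.take_append, List.drop_append]
    simp [List.length_take, Nat.min_eq_left (le_of_lt hi), List.replicate_succ]
    have e1 : List.take (i+1) (List.take i cg) = List.take i cg := by
      rw [List.take_take]; congr 1; omega
    have e2 : List.drop (i+1+n) (List.take i cg) = ([] : List (Option Int)) :=
      List.drop_eq_nil_of_le (by simp; omega)
    have e3 : i + 1 + n - i = n + 1 := by omega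
    rw [e1, e2, e3]
    simp [List.drop_drop]
    omega

theorem pvA_fill_eq (cg : List (Option Int)) (i stop : Nat) (gid : Int)
    (h1 : i ≤ stop) (h2 : stop ≤ cg.length) :
    pvA_fill cg i stop gid
      = cg.take i ++ List.replicate (stop - i) (some gid) ++ cg.drop stop := by
  unfold pvA_fill
  have he : i + (stop - i) = stop := by omega
  have := pvA_fill_loop gid (stop - i) i cg (by omega)
  rw [he] at this
  exact this

theorem pvB_rle_cons (x : Int) (xs : List Int) :
    pvB_rle (x :: xs) = (match pvB_rle xs with
      | [] => [(x, 1)]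
      | (v, n) :: rest => if x = v then (v, n + 1) :: rest else (x, 1) :: (v, n) :: rest) := rfl

theorem pvB_rle_head (x : Int) (xs : List Int) :
    ∃ n rest, pvB_rle (x :: xs) = (x, n) :: rest ∧ 1 ≤ n := by
  induction xs generalizing x with
  | nil => exact ⟨1, [], rfl, le_refl 1⟩
  | cons y ys ih =>
    obtain ⟨n, rest, hy, hn⟩ := ih y
    by_cases hxy : x = y
    · exact ⟨n + 1, rest, by rw [pvB_rle_cons, hy]; simp [hxy], by omega⟩
    · exact ⟨1, (y, n) :: rest, by rw [pvB_rle_cons, hy]; simp [hxy], le_refl 1⟩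

theorem pvB_rle_replicate (x : Int) : ∀ (n : Nat) (rest : List Int), 1 ≤ n →
    (∀ y t, rest = y :: t → y ≠ x) →
    pvB_rle (List.replicate n x ++ rest) = (x, n) :: pvB_rle rest := by
  intro n
  induction n with
  | zero => intro rest h1 _; omega
  | succ n ih =>
    intro rest _ hrest
    by_cases hn : n = 0
    · subst hn
      simp only [List.replicate_succ, List.replicate_zero, List.nil_append, List.cons_append]
      cases rest with
      | nil => rfl
      | cons y t =>
        obtain ⟨m, r, hy, _⟩ := pvB_rle_head y t
        have hyx : y ≠ x := hrest y t rfl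
        rw [pvB_rle_cons, hy]
        have hxy : ¬ x = y := fun e => hyx (Eq.symm e)
        simp [hxy]
    · have hh := ih rest (by omega) hrest
      rw [List.replicate_succ, List.cons_append, pvB_rle_cons, hh]
      simp

theorem pvB_emit_cons_ne (ml gid : Int) (x : Int) (t : List Int) (hx : x ≠ 0) :
    pvB_emit ml gid (pvB_rle (x :: t)) = none :: pvB_emit ml gid (pvB_rle t) := by
  cases t with
  | nil => simp [pvB_rle, pvB_emit, hx]
  | cons y ys =>
    obtain ⟨m, r, hy, hm⟩ := pvB_rle_head y ys
    by_cases hxy : x = y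
    · subst hxy
      rw [pvB_rle_cons, hy]
      simp [pvB_emit, hx, List.replicate_succ]
    · rw [pvB_rle_cons, hy]
      simp [hxy, pvB_emit, hx]

theorem pv_loop_eq (k : Nat) :
    ∀ (masks : List Int) (ml : Int) (i : Nat) (cg : List (Option Int)) (gid : Int),
    masks.length - i ≤ k → i ≤ masks.length → cg.length = masks.length →
    cg.drop i = List.replicate (masks.length - i) none →
    pvA_loop masks ml cg gid i = cg.take i ++ pvB_emit ml gid (pvB_rle (masks.drop i)) := by
  induction k with
  | zero =>
    intro masks ml i cg gid hk hi hlen hdrop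
    have hie : i = masks.length := by omega
    unfold pvA_loop
    rw [dif_neg (by omega)]
    rw [List.drop_eq_nil_of_le (by omega)]
    have ht : cg.take i = cg := List.take_of_length_le (by omega)
    simp [pvB_rle, pvB_emit, ht]
  | succ k ih =>
    intro masks ml i cg gid hk hi hlen hdrop
    by_cases h : i < masks.length
    · by_cases hz : masks[i] = 0
      · have hgt := pvA_scan_gt masks i h hz
        have hle := pvA_scan_le masks i (le_of_lt h)
        have hdec := pvA_scan_drop masks i (le_of_lt h)
        have hstop := pvA_scan_stop masks i
        have hrle : pvB_rle (masks.drop i)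
            = (0, pvA_scan masks i - i) :: pvB_rle (masks.drop (pvA_scan masks i)) := by
          rw [hdec]
          exact pvB_rle_replicate 0 _ _ (by omega) (fun y t hyt => hstop y t hyt)
        have hcast : ((pvA_scan masks i - i : Nat) : Int)
            = (pvA_scan masks i : Int) - (i : Int) := by omega
        have hdrop' : cg.drop (pvA_scan masks i)
            = List.replicate (masks.length - pvA_scan masks i) none := by
          have : cg.drop (pvA_scan masks i) = (cg.drop i).drop (pvA_scan masks i - i) := by
            rw [List.drop_drop]; congr 1; omega
          rw [this, hdrop, List.drop_replicate]; congr 1; omega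
        unfold pvA_loop
        rw [dif_pos h, dif_pos hz]
        by_cases hml : ((pvA_scan masks i : Int) - (i : Int)) ≥ ml
        · rw [if_pos hml]
          have hfill := pvA_fill_eq cg i (pvA_scan masks i) gid (by omega) (by omega)
          have hlen' : (pvA_fill cg i (pvA_scan masks i) gid).length = masks.length := by
            rw [hfill]; simp; omega
          have hlseg : (cg.take i ++ List.replicate (pvA_scan masks i - i) (some gid)).length
              = pvA_scan masks i := by
            simp [List.length_take]; omega
          have hdropf : (pvA_fill cg i (pvA_scan masks i) gid).drop (pvA_scan masks i)
              = List.replicate (masks.length - pvA_scan masks i) none := by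
            rw [hfill, List.drop_left' hlseg]
            exact hdrop'
          have htakef : (pvA_fill cg i (pvA_scan masks i) gid).take (pvA_scan masks i)
              = cg.take i ++ List.replicate (pvA_scan masks i - i) (some gid) := by
            rw [hfill, List.take_left' hlseg]
          rw [ih masks ml (pvA_scan masks i) _ (gid + 1) (by omega) (by omega) hlen' hdropf]
          rw [htakef, hrle]
          have hcond : ((0 : Int) = 0 ∧ ((pvA_scan masks i - i : Nat) : Int) ≥ ml) := ⟨rfl, by omega⟩
          rw [pvB_emit, if_pos hcond]
          simp
        · rw [if_neg hml]
          rw [ih masks ml (pvA_scan masks i) cg gid (by omega) (by omega) hlen hdrop']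
          rw [hrle]
          have hcond : ¬ ((0 : Int) = 0 ∧ ((pvA_scan masks i - i : Nat) : Int) ≥ ml) := by
            intro ⟨_, hc⟩; omega
          rw [pvB_emit, if_neg hcond]
          have htk : cg.take (pvA_scan masks i)
              = cg.take i ++ List.replicate (pvA_scan masks i - i) none := by
            have e : pvA_scan masks i = i + (pvA_scan masks i - i) := by omega
            rw [e, List.take_add, hdrop, List.take_replicate]
            congr 2
            omega
          rw [htk]
          simp
      · unfold pvA_loop
        rw [dif_pos h, dif_neg hz]
        have hdrop1 : cg.drop (i + 1) = List.replicate (masks.length - (i + 1)) none := by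
          have : cg.drop (i + 1) = (cg.drop i).drop 1 := by
            rw [List.drop_drop]
          rw [this, hdrop, List.drop_replicate]
          congr 1
        rw [ih masks ml (i + 1) cg gid (by omega) (by omega) hlen hdrop1]
        have hmd : masks.drop i = masks[i] :: masks.drop (i + 1) := List.drop_eq_getElem_cons h
        rw [hmd, pvB_emit_cons_ne ml gid masks[i] _ hz]
        have hcgi : cg[i]? = some none := by
          have e : cg[i]? = (cg.drop i)[0]? := by simp [List.getElem?_drop]
          rw [e, hdrop]
          simp [List.getElem?_replicate]
          all_goals try omega
        have htk1 : cg.take (i + 1) = cg.take i ++ [none] := by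
          rw [List.take_add_one, hcgi]
          rfl
        rw [htk1]
        simp
    · unfold pvA_loop
      rw [dif_neg h]
      rw [List.drop_eq_nil_of_le (by omega)]
      have ht : cg.take i = cg := List.take_of_length_le (by omega)
      simp [pvB_rle, pvB_emit, ht]

-- ===== bridging B to emit ∘ rle =====

-- [k, k-1, …, 1]: the suffix-run-length entries across a zero run of length k
def pvDescTo : Nat → List Nat
  | 0 => []
  | k + 1 => (k + 1) :: pvDescTo k

theorem pvDescTo_length (k : Nat) : (pvDescTo k).length = k := by
  induction k with
  | zero => rfl
  | succ k ih => simp [pvDescTo, ih]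

-- the three stages of B, named (B itself is pvBgo with g = 0)
def pvBlabeled (ml : Int) (masks : List Int) : List Bool :=
  List.zipWith (fun m lz => decide (m = 0 ∧ (lz.1 : Int) + (lz.2 : Int) - 1 ≥ ml))
    masks ((pvB_llenAux 0 masks).zip (pvB_zlen masks))

def pvBends (ml : Int) (masks : List Int) : List Int :=
  List.zipWith (fun b z => if b && (z == 1) then (1 : Int) else 0)
    (pvBlabeled ml masks) (pvB_zlen masks)

def pvBgo (ml g : Int) (masks : List Int) : List (Option Int) :=
  List.zipWith (fun b gi => if b then some gi else none)
    (pvBlabeled ml masks) (g :: pvB_accum g (pvBends ml masks))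

theorem pvB_zlen_cons_ne (x : Int) (t : List Int) (hx : x ≠ 0) :
    pvB_zlen (x :: t) = 0 :: pvB_zlen t := by
  simp [pvB_zlen, hx]

theorem pvB_llenAux_cons_ne (p : Nat) (x : Int) (t : List Int) (hx : x ≠ 0) :
    pvB_llenAux p (x :: t) = 0 :: pvB_llenAux 0 t := by
  simp [pvB_llenAux, hx]

theorem pvB_zlen_run (k : Nat) (rest : List Int) (h : ∀ y t, rest = y :: t → y ≠ 0) :
    pvB_zlen (List.replicate k 0 ++ rest) = pvDescTo k ++ pvB_zlen rest := by
  induction k with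
  | zero => simp [pvDescTo]
  | succ k ih =>
    rw [List.replicate_succ, List.cons_append]
    show (if (0:Int) = 0 then (pvB_zlen (List.replicate k 0 ++ rest)).headD 0 + 1 else 0)
        :: pvB_zlen (List.replicate k 0 ++ rest) = _
    rw [ih, if_pos rfl]
    have hh : ((pvDescTo k ++ pvB_zlen rest).headD 0) + 1 = k + 1 := by
      cases k with
      | zero =>
        cases rest with
        | nil => rfl
        | cons y t =>
          have hy := h y t rfl
          simp [pvDescTo, pvB_zlen, hy]
      | succ m => simp [pvDescTo]
    rw [hh]
    simp [pvDescTo]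

theorem pvB_llenAux_run (k : Nat) : ∀ (p : Nat) (rest : List Int),
    pvB_llenAux p (List.replicate k 0 ++ rest)
      = List.range' (p + 1) k ++ pvB_llenAux (p + k) rest := by
  induction k with
  | zero => intro p rest; simp
  | succ k ih =>
    intro p rest
    rw [List.replicate_succ, List.cons_append]
    show (if (0:Int) = 0 then p + 1 else 0)
        :: pvB_llenAux (if (0:Int) = 0 then p + 1 else 0) (List.replicate k 0 ++ rest) = _
    rw [if_pos rfl, ih (p + 1) rest, List.range'_succ]
    have he : p + 1 + k = p + (k + 1) := by omega
    rw [he]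
    rfl

theorem pvB_llenAux_fresh (p : Nat) (rest : List Int) (h : ∀ y t, rest = y :: t → y ≠ 0) :
    pvB_llenAux p rest = pvB_llenAux 0 rest := by
  cases rest with
  | nil => rfl
  | cons y t =>
    have hy := h y t rfl
    simp [pvB_llenAux, hy]

theorem pvB_labeled_run (ml : Int) (k : Nat) : ∀ (p : Nat),
    List.zipWith (fun m lz => decide (m = 0 ∧ (lz.1 : Int) + (lz.2 : Int) - 1 ≥ ml))
        (List.replicate k (0 : Int)) ((List.range' (p + 1) k).zip (pvDescTo k))
      = List.replicate k (decide (((p : Int) + (k : Int)) ≥ ml)) := by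
  induction k with
  | zero => intro p; rfl
  | succ k ih =>
    intro p
    rw [List.replicate_succ, List.range'_succ]
    rw [show pvDescTo (k + 1) = (k + 1) :: pvDescTo k from rfl]
    rw [List.zip_cons_cons, List.zipWith_cons_cons, ih (p + 1)]
    rw [List.replicate_succ]
    congr 1
    · apply decide_eq_decide.mpr
      constructor
      · intro ⟨_, hx⟩
        push_cast at hx ⊢
        omega
      · intro hx
        refine ⟨rfl, ?_⟩
        push_cast at hx ⊢
        omega
    · congr 1
      apply decide_eq_decide.mpr
      push_cast
      omega

theorem pvB_ends_zip_run (k : Nat) (hk : 1 ≤ k) (c : Bool) :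
    List.zipWith (fun b z => if b && (z == 1) then (1 : Int) else 0)
        (List.replicate k c) (pvDescTo k)
      = List.replicate (k - 1) (0 : Int) ++ [if c then 1 else 0] := by
  induction k with
  | zero => omega
  | succ k ih =>
    cases k with
    | zero =>
      show [if c && ((1 : Nat) == 1) then (1:Int) else 0] = [if c then 1 else 0]
      simp
    | succ m =>
      rw [List.replicate_succ]
      rw [show pvDescTo (m + 1 + 1) = (m + 2) :: pvDescTo (m + 1) from rfl]
      rw [List.zipWith_cons_cons, ih (by omega)]
      have hz : ((m + 2 : Nat) == 1) = false := by simp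
      rw [hz, Bool.and_false, if_neg (by simp)]
      rw [show m + 1 + 1 - 1 = (m + 1 - 1) + 1 from by omega, List.replicate_succ]
      simp

theorem pv_zipWith_rep {α β γ : Type} (f : α → β → γ) (a : α) (b : β) (k : Nat) :
    List.zipWith f (List.replicate k a) (List.replicate k b) = List.replicate k (f a b) := by
  induction k with
  | zero => rfl
  | succ k ih => simp [List.replicate_succ, ih]

theorem pvB_accum_rep (m : Nat) : ∀ (g : Int) (t : List Int),
    pvB_accum g (List.replicate m 0 ++ t) = List.replicate m g ++ pvB_accum g t := by
  induction m with
  | zero => intro g t; simp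
  | succ m ih =>
    intro g t
    rw [List.replicate_succ, List.cons_append]
    show (g + 0) :: pvB_accum (g + 0) (List.replicate m 0 ++ t) = _
    rw [add_zero, ih g t, List.replicate_succ]
    rfl

theorem pvB_accum_cons0 (g : Int) (es : List Int) :
    pvB_accum g ((0 : Int) :: es) = g :: pvB_accum g es := by
  show (g + 0) :: pvB_accum (g + 0) es = _
  rw [add_zero]

theorem pvBlabeled_cons_ne (ml : Int) (x : Int) (t : List Int) (hx : x ≠ 0) :
    pvBlabeled ml (x :: t) = false :: pvBlabeled ml t := by
  unfold pvBlabeled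
  rw [pvB_zlen_cons_ne x t hx, pvB_llenAux_cons_ne 0 x t hx]
  rw [List.zip_cons_cons, List.zipWith_cons_cons]
  congr 1
  simp [hx]

theorem pvBends_cons_ne (ml : Int) (x : Int) (t : List Int) (hx : x ≠ 0) :
    pvBends ml (x :: t) = 0 :: pvBends ml t := by
  unfold pvBends
  rw [pvBlabeled_cons_ne ml x t hx, pvB_zlen_cons_ne x t hx, List.zipWith_cons_cons]
  congr 1

theorem pvBgo_cons_ne (ml g : Int) (x : Int) (t : List Int) (hx : x ≠ 0) :
    pvBgo ml g (x :: t) = none :: pvBgo ml g t := by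
  unfold pvBgo
  rw [pvBlabeled_cons_ne ml x t hx, pvBends_cons_ne ml x t hx, pvB_accum_cons0]
  rw [List.zipWith_cons_cons, if_neg (by simp)]

theorem pvBlabeled_run (ml : Int) (k : Nat) (rest : List Int)
    (h : ∀ y t, rest = y :: t → y ≠ 0) :
    pvBlabeled ml (List.replicate k 0 ++ rest)
      = List.replicate k (decide ((k : Int) ≥ ml)) ++ pvBlabeled ml rest := by
  unfold pvBlabeled
  rw [pvB_zlen_run k rest h]
  have hllen := pvB_llenAux_run k 0 rest
  simp only [Nat.zero_add] at hllen
  rw [pvB_llenAux_fresh k rest h] at hllen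
  rw [hllen]
  rw [List.zip_append (by rw [List.length_range', pvDescTo_length])]
  rw [List.zipWith_append (by
    rw [List.length_replicate, List.length_zip, List.length_range', pvDescTo_length]
    simp)]
  have hlr := pvB_labeled_run ml k 0
  rw [show (0 : Nat) + 1 = 1 from rfl] at hlr
  rw [hlr]
  congr 2
  apply decide_eq_decide.mpr
  push_cast
  omega

theorem pvBends_run (ml : Int) (k : Nat) (hk : 1 ≤ k) (rest : List Int)
    (h : ∀ y t, rest = y :: t → y ≠ 0) :
    pvBends ml (List.replicate k 0 ++ rest)
      = (List.replicate (k - 1) (0 : Int) ++ [if decide ((k : Int) ≥ ml) then 1 else 0])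
        ++ pvBends ml rest := by
  unfold pvBends
  rw [pvBlabeled_run ml k rest h, pvB_zlen_run k rest h]
  rw [List.zipWith_append (by rw [List.length_replicate, pvDescTo_length])]
  rw [pvB_ends_zip_run k hk]

theorem pvBgo_run (ml g : Int) (k : Nat) (hk : 1 ≤ k) (rest : List Int)
    (h : ∀ y t, rest = y :: t → y ≠ 0) :
    pvBgo ml g (List.replicate k 0 ++ rest)
      = List.replicate k (if decide ((k : Int) ≥ ml) then some g else none)
        ++ pvBgo ml (g + (if decide ((k : Int) ≥ ml) then 1 else 0)) rest := by
  set c : Bool := decide ((k : Int) ≥ ml) with hc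
  unfold pvBgo
  rw [pvBlabeled_run ml k rest h, pvBends_run ml k hk rest h]
  rw [List.append_assoc, List.singleton_append]
  rw [pvB_accum_rep (k - 1) g ((if c then (1:Int) else 0) :: pvBends ml rest)]
  rw [show pvB_accum g ((if c then (1:Int) else 0) :: pvBends ml rest)
      = (g + (if c then 1 else 0)) :: pvB_accum (g + (if c then 1 else 0)) (pvBends ml rest)
      from rfl]
  have hgids : g :: (List.replicate (k - 1) g
        ++ (g + (if c then 1 else 0))
            :: pvB_accum (g + (if c then 1 else 0)) (pvBends ml rest))
      = List.replicate k g
        ++ (g + (if c then 1 else 0))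
            :: pvB_accum (g + (if c then 1 else 0)) (pvBends ml rest) := by
    rw [show k = (k - 1) + 1 from by omega, List.replicate_succ]
    rfl
  rw [hgids]
  rw [List.zipWith_append (by rw [List.length_replicate, List.length_replicate])]
  rw [pv_zipWith_rep]

theorem pv_emit_bgo (n : Nat) : ∀ (masks : List Int), masks.length ≤ n → ∀ (ml g : Int),
    pvB_emit ml g (pvB_rle masks) = pvBgo ml g masks := by
  induction n with
  | zero =>
    intro masks hm ml g
    have : masks = [] := List.eq_nil_of_length_eq_zero (by omega)
    subst this
    rfl
  | succ n ih =>
    intro masks hm ml g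
    cases hmm : masks with
    | nil => rfl
    | cons x t =>
      subst hmm
      by_cases hx : x = 0
      · subst hx
        have hdecomp : (0 : Int) :: t = List.replicate (pvA_scan ((0:Int) :: t) 0) 0
            ++ ((0:Int) :: t).drop (pvA_scan ((0:Int) :: t) 0) := by
          have := pvA_scan_drop ((0:Int) :: t) 0 (by omega)
          simpa using this
        set masks := (0 : Int) :: t with hmasks
        set k := pvA_scan masks 0 with hkdef
        set rest := masks.drop k with hrestdef
        have hk1 : 1 ≤ k := pvA_scan_gt masks 0 (by simp [hmasks]) (by simp [hmasks])
        have hkle : k ≤ masks.length := pvA_scan_le masks 0 (by omega)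
        have hfresh : ∀ y t', rest = y :: t' → y ≠ 0 := fun y t' hyt =>
          pvA_scan_stop masks 0 y t' hyt
        have hrlen : rest.length < masks.length := by
          rw [hrestdef, List.length_drop]
          omega
        rw [hdecomp]
        rw [pvB_rle_replicate 0 k rest hk1 hfresh]
        rw [pvBgo_run ml g k hk1 rest hfresh]
        by_cases hml : (k : Int) ≥ ml
        · rw [show pvB_emit ml g ((0, k) :: pvB_rle rest)
              = List.replicate k (some g) ++ pvB_emit ml (g + 1) (pvB_rle rest) from by
            rw [pvB_emit, if_pos ⟨rfl, hml⟩]]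
          rw [if_pos (decide_eq_true hml), if_pos (decide_eq_true hml)]
          rw [ih rest (by omega) ml (g + 1)]
        · rw [show pvB_emit ml g ((0, k) :: pvB_rle rest)
              = List.replicate k none ++ pvB_emit ml g (pvB_rle rest) from by
            rw [pvB_emit, if_neg (fun hcon => hml hcon.2)]]
          rw [if_neg (by simpa using hml), if_neg (by simpa using hml), add_zero]
          rw [ih rest (by omega) ml g]
      · rw [pvB_emit_cons_ne ml g x t hx, pvBgo_cons_ne ml g x t hx]
        rw [ih t (by simp at hm; omega) ml g]

-- ===== VERDICT (by name: the statement is the Claim_ definition above) =====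
theorem identify_collapse_groups_py_spec : Claim_equal_identify_collapse_groups_py := by
  intro masks ml _
  unfold Spec_identify_collapse_groups_py identify_collapse_groups_py
  rw [pv_loop_eq masks.length masks ml 0 (List.replicate masks.length none) 0
      (by omega) (by omega) (by simp) (by simp)]
  simp only [List.take_zero, List.drop_zero, List.nil_append]
  rw [pv_emit_bgo masks.length masks (le_refl _) ml 0]
  rfl
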